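-- pv_equiv track=rewrite | github.com/PreethamRavula/Python_3 | Code_challenges_1/loops_challenge_advanced.py | same_values
-- ===== SOURCE A (Python) =====
-- def same_values(lst1, lst2):
--   new_list = []
--   length = len(lst1)
--   for i in range(0, length):
--     for j in range(0, length):
--       if lst1[i] == lst2[j] and i == j:
--         new_list.append(i)
--
--   return new_list
-- ===== SOURCE B (Python) =====
-- def same_values(lst1, lst2):
--     return [i for i, (x, y) in enumerate(zip(lst1, lst2)) if x == y]
-- ===== Notes on version B (the rewrite author's own statement) =====
-- stated objective: faster
-- what changed: Replaced the O(n^2) double loop (whose inner scan only ever fires at j==i) by a single pass over enumerate(zip(lst1, lst2)) collecting the matching indices.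
import Mathlib
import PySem

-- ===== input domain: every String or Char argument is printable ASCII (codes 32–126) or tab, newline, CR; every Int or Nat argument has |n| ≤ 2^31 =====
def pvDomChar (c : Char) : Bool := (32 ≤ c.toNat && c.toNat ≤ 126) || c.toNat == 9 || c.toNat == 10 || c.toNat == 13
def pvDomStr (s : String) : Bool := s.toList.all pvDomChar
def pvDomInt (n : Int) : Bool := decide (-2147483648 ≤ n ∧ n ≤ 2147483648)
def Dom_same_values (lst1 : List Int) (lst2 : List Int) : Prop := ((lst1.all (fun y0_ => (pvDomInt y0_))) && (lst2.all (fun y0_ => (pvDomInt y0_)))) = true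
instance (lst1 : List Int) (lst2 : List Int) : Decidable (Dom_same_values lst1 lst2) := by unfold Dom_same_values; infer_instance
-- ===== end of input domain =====

-- B replaces A's quadratic double loop by one pass over enumerate(zip(lst1, lst2)).
-- Equivalence is about the return value on inputs where A does not raise (Pre_ below).

-- ===== PORT A =====
def same_values (lst1 : List Int) (lst2 : List Int) : List Int :=
  (PySem.List.pyRange 0 lst1.length 1).foldl (fun acc i =>
    (PySem.List.pyRange 0 lst1.length 1).foldl (fun acc2 j =>
      if PySem.List.pyGetD lst1 i 0 = PySem.List.pyGetD lst2 j 0 ∧ i = j then acc2 ++ [i] else acc2)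
      acc) []

-- ===== PORT B =====
def same_values_alt (lst1 : List Int) (lst2 : List Int) : List Int :=
  (PySem.List.enumerate (lst1.zip lst2) 0).foldl
    (fun acc p => if p.2.1 = p.2.2 then acc ++ [p.1] else acc) []

-- ===== PRECONDITION & SPEC =====
-- A raises IndexError on lst2[j] whenever lst1 is longer than lst2 (and nonempty); Pre_ excludes exactly those inputs.
def Pre_same_values (lst1 : List Int) (lst2 : List Int) : Prop := lst1.length ≤ lst2.length
instance (lst1 : List Int) (lst2 : List Int) : Decidable (Pre_same_values lst1 lst2) := by unfold Pre_same_values; infer_instance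
def pvWitness_same_values : List Int × List Int := ([1, 2, 3], [1, 0, 3])

def Spec_same_values (lst1 : List Int) (lst2 : List Int) (out : List Int) : Prop := out = same_values_alt lst1 lst2
instance (lst1 : List Int) (lst2 : List Int) (out : List Int) : Decidable (Spec_same_values lst1 lst2 out) := by unfold Spec_same_values; infer_instance

-- ===== CLAIM (what is proved, stated in full; the proofs are below) =====
def Claim_equal_same_values : Prop := ∀ (lst1 : List Int) (lst2 : List Int), Dom_same_values lst1 lst2 → Pre_same_values lst1 lst2 → Spec_same_values lst1 lst2 (same_values lst1 lst2)

-- ===== LEMMAS AND PROOFS =====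

-- enumerate as a map over List.range (with an arbitrary default for getD, indices in range).
lemma enumerate_eq_map_range {α : Type} (d : α) :
    ∀ (xs : List α) (s : Int),
      PySem.List.enumerate xs s = (List.range xs.length).map (fun (k : Nat) => (s + (k : Int), xs.getD k d)) := by
  intro xs
  induction xs with
  | nil => intro s; simp [PySem.List.enumerate_nil]
  | cons x t ih =>
      intro s
      rw [PySem.List.enumerate_cons, ih (s + 1)]
      simp only [List.length_cons, List.range_succ_eq_map, List.map_cons, List.map_map]
      refine congrArg₂ _ ?_ ?_
      · simp
      · apply List.map_congr_left
        intro k _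
        simp [Function.comp]
        ring

-- A's inner loop over j only fires at j = i: it is a single conditional append (for 0 ≤ i < n).
lemma inner_loop_eq (lst1 lst2 : List Int) (i : Int) (hi0 : 0 ≤ i) (hin : i < (lst1.length : Int)) (acc : List Int) :
    (PySem.List.pyRange 0 lst1.length 1).foldl (fun acc2 j =>
      if PySem.List.pyGetD lst1 i 0 = PySem.List.pyGetD lst2 j 0 ∧ i = j then acc2 ++ [i] else acc2) acc
    = if PySem.List.pyGetD lst1 i 0 = PySem.List.pyGetD lst2 i 0 then acc ++ [i] else acc := by
  rw [PySem.List.pyRange_one_append 0 i (lst1.length) hi0 (le_of_lt hin)]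
  rw [PySem.List.pyRange_one_cons hin]
  rw [List.foldl_append]
  have hleft : (PySem.List.pyRange 0 i 1).foldl (fun acc2 j =>
      if PySem.List.pyGetD lst1 i 0 = PySem.List.pyGetD lst2 j 0 ∧ i = j then acc2 ++ [i] else acc2) acc = acc := by
    rw [PySem.List.foldl_congr_mem (g := fun acc2 _ => acc2)]
    · exact PySem.List.foldl_ignore _ _
    · intro a j hj
      have := (PySem.List.mem_pyRange_one).1 hj
      have : ¬ (PySem.List.pyGetD lst1 i 0 = PySem.List.pyGetD lst2 j 0 ∧ i = j) := by
        rintro ⟨-, rfl⟩; omega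
      simp [this]
  rw [hleft]
  rw [List.foldl_cons]
  have hright : ∀ acc3 : List Int, (PySem.List.pyRange (i + 1) (lst1.length) 1).foldl (fun acc2 j =>
      if PySem.List.pyGetD lst1 i 0 = PySem.List.pyGetD lst2 j 0 ∧ i = j then acc2 ++ [i] else acc2) acc3 = acc3 := by
    intro acc3
    rw [PySem.List.foldl_congr_mem (g := fun acc2 _ => acc2)]
    · exact PySem.List.foldl_ignore _ _
    · intro a j hj
      have := (PySem.List.mem_pyRange_one).1 hj
      have : ¬ (PySem.List.pyGetD lst1 i 0 = PySem.List.pyGetD lst2 j 0 ∧ i = j) := by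
        rintro ⟨-, rfl⟩; omega
      simp [this]
  rw [hright]
  by_cases h : PySem.List.pyGetD lst1 i 0 = PySem.List.pyGetD lst2 i 0 <;> simp [h]

theorem same_values_spec : Claim_equal_same_values := by
  intro lst1 lst2 _ hpre
  unfold Pre_same_values at hpre
  unfold Spec_same_values same_values same_values_alt
  -- collapse A's inner loop
  rw [PySem.List.foldl_congr_mem
        (g := fun acc i => if PySem.List.pyGetD lst1 i 0 = PySem.List.pyGetD lst2 i 0 then acc ++ [i] else acc)]
  · -- both sides as filter-then-map over List.range
    rw [PySem.List.foldl_append_ite (p := fun i => PySem.List.pyGetD lst1 i 0 = PySem.List.pyGetD lst2 i 0) (f := fun i => i)]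
    rw [PySem.List.foldl_append_ite (p := fun p : Int × (Int × Int) => p.2.1 = p.2.2) (f := fun p => p.1)]
    rw [enumerate_eq_map_range ((0 : Int), (0 : Int))]
    rw [PySem.List.pyRange_zero_natCast]
    rw [List.filter_map, List.map_map]
    have hlen : (lst1.zip lst2).length = lst1.length := by
      simp [List.length_zip]; omega
    rw [hlen]
    rw [List.filter_map, List.map_map]
    have hfil : List.filter ((fun x => decide (PySem.List.pyGetD lst1 x 0 = PySem.List.pyGetD lst2 x 0)) ∘ fun (k : Nat) => (k : Int)) (List.range lst1.length)
        = List.filter ((fun (x : Int × (Int × Int)) => decide (x.2.1 = x.2.2)) ∘ fun (k : Nat) => ((0 : Int) + (k : Int), (lst1.zip lst2).getD k (0, 0))) (List.range lst1.length) := by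
      apply List.filter_congr
      intro k hk
      have hk' : k < lst1.length := List.mem_range.1 hk
      have hk2 : k < lst2.length := by omega
      have h1 : lst1[k]? = some lst1[k] := List.getElem?_eq_getElem hk'
      have h2 : lst2[k]? = some (lst2[k]'hk2) := List.getElem?_eq_getElem hk2
      have hz : (lst1.zip lst2)[k]? = some (lst1[k], lst2[k]'hk2) := by
        rw [List.getElem?_eq_getElem (by rw [hlen]; exact hk')]
        simp [List.getElem_zip]
      simp [Function.comp, PySem.List.pyGetD_natCast, h1, h2, hz]
    rw [hfil]
    apply List.map_congr_left
    intro k _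
    simp [Function.comp]
  · intro acc i hi
    have h := (PySem.List.mem_pyRange_one).1 hi
    exact inner_loop_eq lst1 lst2 i h.1 h.2 acc

-- ===== VERDICT (by name: the statement is the Claim_ definition above) =====
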